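-- pv_equiv track=rewrite | github.com/details212/tradefinder | leo/calculate_studies.py | calc_atr_streaks
-- ===== SOURCE A (Python) =====
-- def calc_atr_streaks(atr_values: list):
--     """
--     Walk-forward streak analysis on ATR values.
--
--     Returns three lists aligned to input:
--       atr_declining_bars  int   — current consecutive declining streak length (0 if ATR is rising)
--       atr_streak_len      int   — length of the most recently *completed* declining streak (None if no prior streak)
--       atr_streak_ago      int   — bars since that completed streak ended (None if currently declining or no prior streak)
--
--     Display logic:
--       atr_declining_bars > 0  → stock is currently compressing  ("↓ N bars")
--       atr_declining_bars = 0  → compression ended; show "M bars ago · L bars long"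
--     """
--     n = len(atr_values)
--     atr_declining_bars = [0]   * n
--     atr_streak_len     = [None] * n
--     atr_streak_ago     = [None] * n
--
--     current_streak        = 0
--     last_completed_len    = None
--     last_completed_end    = None   # index of the last bar of the most recent completed streak
--
--     for i in range(1, n):
--         prev = atr_values[i - 1]
--         cur  = atr_values[i]
--
--         if cur is None or prev is None:
--             if current_streak > 0:
--                 last_completed_len = current_streak
--                 last_completed_end = i - 1
--             current_streak = 0
--         elif cur < prev:
--             current_streak += 1
--         else:
--             if current_streak > 0:
--                 last_completed_len = current_streak
--                 last_completed_end = i - 1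
--             current_streak = 0
--
--         atr_declining_bars[i] = current_streak
--
--         if current_streak == 0:
--             atr_streak_len[i] = last_completed_len
--             atr_streak_ago[i] = (i - last_completed_end) if last_completed_end is not None else None
--         # else: None (currently in an active streak — use atr_declining_bars instead)
--
--     return atr_declining_bars, atr_streak_len, atr_streak_ago
-- ===== SOURCE B (Python) =====
-- def calc_atr_streaks(atr_values: list):
--     # Two-pass decomposition: first build the declining-run table from adjacent
--     # pairs, then derive completed-streak length/ago from that table alone.
--     n = len(atr_values)
--     if n == 0:
--         return [], [], []
--     declining = [0]
--     run = 0
--     for prev, cur in zip(atr_values, atr_values[1:]):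
--         run = run + 1 if (prev is not None and cur is not None and cur < prev) else 0
--         declining.append(run)
--     streak_len = [None]
--     streak_ago = [None]
--     last_len = None
--     last_end = None
--     for i, (dprev, dcur) in enumerate(zip(declining, declining[1:]), 1):
--         if dcur == 0:
--             if dprev > 0:
--                 last_len = dprev
--                 last_end = i - 1
--             streak_len.append(last_len)
--             streak_ago.append(i - last_end if last_end is not None else None)
--         else:
--             streak_len.append(None)
--             streak_ago.append(None)
--     return declining, streak_len, streak_ago
-- ===== Notes on version B (the rewrite author's own statement) =====
-- stated objective: alternative
-- what changed: A's single interleaved imperative loop (index-writes into three preallocated arrays with live streak bookkeeping) is replaced by a two-pass decomposition: one pass builds the declining-run table from adjacent pairs, a second derived pass reads only that table to reconstruct completed-streak length/ago, appending results instead of index-assignment.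
import Mathlib
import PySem

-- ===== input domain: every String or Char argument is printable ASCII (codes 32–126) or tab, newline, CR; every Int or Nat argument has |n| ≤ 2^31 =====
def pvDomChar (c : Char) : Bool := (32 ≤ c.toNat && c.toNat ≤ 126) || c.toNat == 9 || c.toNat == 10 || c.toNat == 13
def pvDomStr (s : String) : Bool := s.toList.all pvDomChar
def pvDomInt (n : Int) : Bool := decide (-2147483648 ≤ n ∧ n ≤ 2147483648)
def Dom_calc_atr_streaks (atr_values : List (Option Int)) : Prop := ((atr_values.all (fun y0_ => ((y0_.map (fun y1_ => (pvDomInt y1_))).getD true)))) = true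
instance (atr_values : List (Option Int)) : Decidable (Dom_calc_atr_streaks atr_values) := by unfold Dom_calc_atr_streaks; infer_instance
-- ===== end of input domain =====

-- B replaces A's single interleaved index-writing loop by a two-pass decomposition:
-- build the declining-run table, then derive streak length/ago from that table alone.

-- ===== PORT A =====
-- branch block of A's loop body: computes (current_streak, last_completed_len, last_completed_end)
def pvUpdA (prev cur : Option Int) (cs : Int) (lcl lce : Option Int) (i : Int) :
    Int × Option Int × Option Int :=
  if cur = none ∨ prev = none then
    if cs > 0 then ((0 : Int), some cs, some (i - 1)) else ((0 : Int), lcl, lce)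
  else if cur.getD 0 < prev.getD 0 then (cs + 1, lcl, lce)
  else
    if cs > 0 then ((0 : Int), some cs, some (i - 1)) else ((0 : Int), lcl, lce)

-- loop body of A (state: declining, streak_len, streak_ago, current_streak, last_completed_len, last_completed_end)
def pvStepA (atr : List (Option Int))
    (st : List Int × List (Option Int) × List (Option Int) × Int × Option Int × Option Int)
    (i : Int) :
    List Int × List (Option Int) × List (Option Int) × Int × Option Int × Option Int :=
  match st with
  | (db, sl, sa, cs, lcl, lce) =>
    -- indices i-1 and i are always in range (1 ≤ i < len), so pyGetD/pySetD are exact here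
    let prev := PySem.List.pyGetD atr (i - 1) none
    let cur := PySem.List.pyGetD atr i none
    match pvUpdA prev cur cs lcl lce i with
    | (cs', lcl', lce') =>
      let db' := PySem.List.pySetD db i cs'
      if cs' = 0 then
        (db', PySem.List.pySetD sl i lcl',
         PySem.List.pySetD sa i (match lce' with | some e => some (i - e) | none => none),
         cs', lcl', lce')
      else
        (db', sl, sa, cs', lcl', lce')

def calc_atr_streaks (atr_values : List (Option Int)) : List Int × List (Option Int) × List (Option Int) :=
  let n : Int := atr_values.length
  let st := (PySem.List.pyRange 1 n 1).foldl (pvStepA atr_values)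
    (List.replicate atr_values.length (0 : Int),
     List.replicate atr_values.length (none : Option Int),
     List.replicate atr_values.length (none : Option Int),
     (0 : Int), (none : Option Int), (none : Option Int))
  (st.1, st.2.1, st.2.2.1)

-- ===== PORT B =====
-- first pass of B: declining runs over adjacent pairs (the zip loop)
def pvRuns : List (Option Int) → Int → List Int
  | prev :: cur :: rest, run =>
      let run' : Int :=
        match prev, cur with
        | some p, some c => if c < p then run + 1 else 0
        | _, _ => 0
      run' :: pvRuns (cur :: rest) run'
  | _, _ => []

-- second pass of B: derive (streak_len, streak_ago) from adjacent pairs of the declining table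
def pvDerive : List Int → Int → Option Int → Option Int → List (Option Int) × List (Option Int)
  | dprev :: dcur :: rest, i, lastLen, lastEnd =>
      if dcur = 0 then
        let lastLen' := if dprev > 0 then some dprev else lastLen
        let lastEnd' := if dprev > 0 then some (i - 1) else lastEnd
        let r := pvDerive (dcur :: rest) (i + 1) lastLen' lastEnd'
        (lastLen' :: r.1,
         (match lastEnd' with | some e => some (i - e) | none => none) :: r.2)
      else
        let r := pvDerive (dcur :: rest) (i + 1) lastLen lastEnd
        ((none : Option Int) :: r.1, (none : Option Int) :: r.2)
  | _, _, _, _ => ([], [])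

def calc_atr_streaks_alt (atr_values : List (Option Int)) : List Int × List (Option Int) × List (Option Int) :=
  match atr_values with
  | [] => ([], [], [])
  | a0 :: rest =>
      let declining := (0 : Int) :: pvRuns (a0 :: rest) 0
      let r := pvDerive declining 1 none none
      (declining, (none : Option Int) :: r.1, (none : Option Int) :: r.2)

-- ===== PRECONDITION & SPEC =====
def Spec_calc_atr_streaks (atr_values : List (Option Int)) (out : List Int × List (Option Int) × List (Option Int)) : Prop := out = calc_atr_streaks_alt atr_values
instance (atr_values : List (Option Int)) (out : List Int × List (Option Int) × List (Option Int)) : Decidable (Spec_calc_atr_streaks atr_values out) := by unfold Spec_calc_atr_streaks; infer_instance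

-- ===== CLAIM (what is proved, stated in full; the proofs are below) =====
def Claim_equal_calc_atr_streaks : Prop := ∀ (atr_values : List (Option Int)), Dom_calc_atr_streaks atr_values → Spec_calc_atr_streaks atr_values (calc_atr_streaks atr_values)

-- ===== LEMMAS AND PROOFS =====

lemma pv_getD_append_len {α : Type} (pre : List α) (y : α) (ys : List α) (d : α) :
    (pre ++ y :: ys).getD pre.length d = y := by
  simp [List.getD]

lemma pv_getD_append_len_succ {α : Type} (pre : List α) (y z : α) (ys : List α) (d : α) :
    (pre ++ y :: z :: ys).getD (pre.length + 1) d = z := by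
  have h := pv_getD_append_len (pre ++ [y]) z ys d
  simpa using h

def pvRun' (prev cur : Option Int) (run : Int) : Int :=
  match prev, cur with
  | some p, some c => if c < p then run + 1 else 0
  | _, _ => 0

def pvLclN (prev cur : Option Int) (run : Int) (lcl : Option Int) : Option Int :=
  if pvRun' prev cur run = 0 ∧ run > 0 then some run else lcl

def pvLceN (k : ℕ) (prev cur : Option Int) (run : Int) (lce : Option Int) : Option Int :=
  if pvRun' prev cur run = 0 ∧ run > 0 then some (k : Int) else lce

lemma pvUpdA_eq (prev cur : Option Int) (cs : Int) (lcl lce : Option Int) (k : ℕ) :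
    pvUpdA prev cur cs lcl lce ((k : Int) + 1)
      = (pvRun' prev cur cs, pvLclN prev cur cs lcl, pvLceN k prev cur cs lce) := by
  have h1 : ((k : Int) + 1 - 1) = (k : Int) := by ring
  cases prev with
  | none =>
    by_cases hr : cs > 0 <;>
      simp [pvUpdA, pvRun', pvLclN, pvLceN, hr, h1]
  | some p =>
    cases cur with
    | none =>
      by_cases hr : cs > 0 <;>
        simp [pvUpdA, pvRun', pvLclN, pvLceN, hr, h1]
    | some c =>
      by_cases hc : c < p
      · by_cases h0 : cs + 1 = 0
        · simp [pvUpdA, pvRun', pvLclN, pvLceN, hc, h0]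
          constructor <;> (intro h; omega)
        · simp [pvUpdA, pvRun', pvLclN, pvLceN, hc, h0]
      · by_cases hr : cs > 0 <;>
          simp [pvUpdA, pvRun', pvLclN, pvLceN, hc, hr, h1]

lemma pv_step_eval (pre rest : List (Option Int)) (prev cur : Option Int)
    (db : List Int) (sl sa : List (Option Int)) (run : Int) (lcl lce : Option Int) :
    pvStepA (pre ++ prev :: cur :: rest) (db, sl, sa, run, lcl, lce) ((pre.length : Int) + 1)
      = (db.set (pre.length + 1) (pvRun' prev cur run),
         if pvRun' prev cur run = 0 then sl.set (pre.length + 1) (pvLclN prev cur run lcl) else sl,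
         if pvRun' prev cur run = 0 then
           sa.set (pre.length + 1)
             (match pvLceN pre.length prev cur run lce with
              | some e => some ((pre.length : Int) + 1 - e) | none => none)
         else sa,
         pvRun' prev cur run, pvLclN prev cur run lcl, pvLceN pre.length prev cur run lce) := by
  have hprev : PySem.List.pyGetD (pre ++ prev :: cur :: rest) ((pre.length : Int) + 1 - 1) none = prev := by
    have h1 : ((pre.length : Int) + 1 - 1) = (pre.length : Int) := by ring
    rw [h1, PySem.List.pyGetD_natCast, pv_getD_append_len]
  have hcur : PySem.List.pyGetD (pre ++ prev :: cur :: rest) ((pre.length : Int) + 1) none = cur := by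
    have h1 : ((pre.length : Int) + 1) = ((pre.length + 1 : ℕ) : Int) := by push_cast; ring
    rw [h1, PySem.List.pyGetD_natCast, pv_getD_append_len_succ]
  have hset : ((pre.length : Int) + 1) = ((pre.length + 1 : ℕ) : Int) := by push_cast; ring
  have hsetD : ∀ {α : Type} (xs : List α) (v : α),
      PySem.List.pySetD xs ((pre.length : Int) + 1) v = xs.set (pre.length + 1) v := by
    intro α xs v
    rw [PySem.List.pySetD_of_nonneg xs v (by omega)]
    congr 1
  simp only [pvStepA, hprev, hcur, pvUpdA_eq, hsetD]
  split_ifs <;> rfl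

lemma pv_take_set_succ {α : Type} (l : List α) (i : ℕ) (v : α) (h : i < l.length) :
    (l.set i v).take (i + 1) = l.take i ++ [v] := by
  rw [List.set_eq_take_cons_drop v h, List.take_append]
  simp [List.length_take, Nat.min_eq_left (Nat.le_of_lt h)]

lemma pv_drop_set {α : Type} (l : List α) (i j : ℕ) (v : α) (h : i < j) :
    (l.set i v).drop j = l.drop j := by
  rw [List.drop_set]
  simp [Nat.not_le_of_lt h]

lemma pv_take_succ_of_drop {α : Type} (l : List α) (i : ℕ) (x : α) (t : List α)
    (h : l.drop i = x :: t) : l.take (i + 1) = l.take i ++ [x] := by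
  rw [List.take_add_one]
  have h2 : l[i]? = some x := by
    have h3 : (l.drop i)[0]? = l[i + 0]? := List.getElem?_drop
    simp [h] at h3
    simp [h3.symm]
  simp [h2]

lemma pvRuns_cons (prev cur : Option Int) (rest : List (Option Int)) (run : Int) :
    pvRuns (prev :: cur :: rest) run
      = pvRun' prev cur run :: pvRuns (cur :: rest) (pvRun' prev cur run) := rfl

lemma pv_main :
    ∀ (rest pre : List (Option Int)) (prev : Option Int)
      (db : List Int) (sl sa : List (Option Int)) (run : Int) (lcl lce : Option Int),
      db.length = pre.length + 1 + rest.length →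
      sl.length = pre.length + 1 + rest.length →
      sa.length = pre.length + 1 + rest.length →
      sl.drop (pre.length + 1) = List.replicate rest.length none →
      sa.drop (pre.length + 1) = List.replicate rest.length none →
      ∃ cs' lcl' lce',
      (PySem.List.pyRange ((pre.length : Int) + 1) ((pre.length : Int) + 1 + rest.length) 1).foldl
          (pvStepA (pre ++ prev :: rest)) (db, sl, sa, run, lcl, lce)
        = (db.take (pre.length + 1) ++ pvRuns (prev :: rest) run,
           sl.take (pre.length + 1) ++ (pvDerive (run :: pvRuns (prev :: rest) run) ((pre.length : Int) + 1) lcl lce).1,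
           sa.take (pre.length + 1) ++ (pvDerive (run :: pvRuns (prev :: rest) run) ((pre.length : Int) + 1) lcl lce).2,
           cs', lcl', lce') := by
  intro rest
  induction rest with
  | nil =>
    intro pre prev db sl sa run lcl lce hdb hsl hsa hslD hsaD
    simp only [List.length_nil, Nat.add_zero] at hdb hsl hsa
    refine ⟨run, lcl, lce, ?_⟩
    rw [PySem.List.pyRange_one_eq_nil (by simp)]
    simp only [List.foldl_nil, pvRuns, pvDerive]
    rw [List.take_of_length_le (by omega), List.take_of_length_le (by omega),
        List.take_of_length_le (by omega)]
    simp
  | cons cur rest' ih =>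
    intro pre prev db sl sa run lcl lce hdb hsl hsa hslD hsaD
    have hcons : PySem.List.pyRange ((pre.length : Int) + 1)
        ((pre.length : Int) + 1 + (cur :: rest').length) 1
        = ((pre.length : Int) + 1) ::
          PySem.List.pyRange ((pre.length : Int) + 1 + 1)
            ((pre.length : Int) + 1 + (cur :: rest').length) 1 := by
      rw [PySem.List.pyRange_one_cons (by simp)]
    rw [hcons, List.foldl_cons, pv_step_eval pre rest' prev cur db sl sa run lcl lce]
    have hdrop2sl : sl.drop (pre.length + 1 + 1) = List.replicate rest'.length none := by
      rw [← List.drop_drop, hslD]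
      simp [List.replicate_succ]
    have hdrop2sa : sa.drop (pre.length + 1 + 1) = List.replicate rest'.length none := by
      rw [← List.drop_drop, hsaD]
      simp [List.replicate_succ]
    obtain ⟨cs', lcl', lce', hih⟩ := ih (pre ++ [prev]) cur
      (db.set (pre.length + 1) (pvRun' prev cur run))
      (if pvRun' prev cur run = 0 then sl.set (pre.length + 1) (pvLclN prev cur run lcl) else sl)
      (if pvRun' prev cur run = 0 then
        sa.set (pre.length + 1)
          (match pvLceN pre.length prev cur run lce with
           | some e => some ((pre.length : Int) + 1 - e) | none => none)
       else sa)
      (pvRun' prev cur run) (pvLclN prev cur run lcl) (pvLceN pre.length prev cur run lce)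
      (by simp at hdb ⊢; omega)
      (by split_ifs <;> simp at hsl ⊢ <;> omega)
      (by split_ifs <;> simp at hsa ⊢ <;> omega)
      (by
        split_ifs
        · rw [List.length_append, List.length_cons, List.length_nil,
              pv_drop_set sl (pre.length + 1) (pre.length + 1 + 1) _ (by omega)]
          exact hdrop2sl
        · rw [List.length_append, List.length_cons, List.length_nil]
          exact hdrop2sl)
      (by
        split_ifs
        · rw [List.length_append, List.length_cons, List.length_nil,
              pv_drop_set sa (pre.length + 1) (pre.length + 1 + 1) _ (by omega)]
          exact hdrop2sa
        · rw [List.length_append, List.length_cons, List.length_nil]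
          exact hdrop2sa)
    simp only [List.length_append, List.length_cons, List.length_nil, List.append_assoc,
      List.cons_append, List.nil_append, Nat.cast_add, Nat.cast_one, Nat.cast_zero,
      Nat.zero_add, Nat.add_zero] at hih ⊢
    refine ⟨cs', lcl', lce', ?_⟩
    rw [show ((pre.length : Int) + 1 + ((rest'.length : Int) + 1))
          = ((pre.length : Int) + 1 + 1 + (rest'.length : Int)) by ring]
    rw [hih]
    have hdbl : pre.length + 1 < db.length := by simp at hdb; omega
    have hsll : pre.length + 1 < sl.length := by simp at hsl; omega
    have hsal : pre.length + 1 < sa.length := by simp at hsa; omega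
    have hslD' : sl.drop (pre.length + 1) = none :: List.replicate rest'.length none := by
      rw [hslD]; simp [List.replicate_succ]
    have hsaD' : sa.drop (pre.length + 1) = none :: List.replicate rest'.length none := by
      rw [hsaD]; simp [List.replicate_succ]
    by_cases hz : pvRun' prev cur run = 0
    · simp only [pvRuns_cons, if_pos hz, hz,
        pv_take_set_succ db (pre.length + 1) _ hdbl]
      simp [pvDerive, pvLclN, pvLceN, hz, List.append_assoc]
      rw [pv_take_set_succ sl (pre.length + 1) _ hsll, pv_take_set_succ sa (pre.length + 1) _ hsal]
      simp
    · simp only [pvRuns_cons, if_neg hz]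
      rw [pv_take_set_succ db (pre.length + 1) _ hdbl,
          pv_take_succ_of_drop sl (pre.length + 1) none _ hslD',
          pv_take_succ_of_drop sa (pre.length + 1) none _ hsaD']
      simp [pvDerive, pvLclN, pvLceN, hz, List.append_assoc]

lemma pv_final :
    ∀ (atr_values : List (Option Int)),
      calc_atr_streaks atr_values = calc_atr_streaks_alt atr_values := by
  intro atr
  cases atr with
  | nil => decide
  | cons a0 rest =>
    obtain ⟨cs', lcl', lce', h⟩ := pv_main rest [] a0
      (List.replicate (rest.length + 1) (0 : Int))
      (List.replicate (rest.length + 1) (none : Option Int))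
      (List.replicate (rest.length + 1) (none : Option Int))
      0 none none (by simp; omega) (by simp; omega) (by simp; omega) (by simp) (by simp)
    simp only [List.length_nil, Nat.cast_zero, zero_add, List.nil_append] at h
    unfold calc_atr_streaks calc_atr_streaks_alt
    simp only [List.length_cons, Nat.cast_add, Nat.cast_one]
    rw [show ((rest.length : Int) + 1) = (1 + (rest.length : Int)) by ring, h]
    simp [List.take_replicate, List.replicate_succ]

-- ===== VERDICT (by name: the statement is the Claim_ definition above) =====
theorem calc_atr_streaks_spec : Claim_equal_calc_atr_streaks := by
  intro atr_values _
  unfold Spec_calc_atr_streaks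
  exact pv_final atr_values
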